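-- pv_equiv track=rewrite | github.com/jihun-24k/Algorithm | Programmers/jacquard.py | multiple_sets
-- ===== SOURCE A (Python) =====
-- def multiple_sets(string):
--     lists = []
--     for i in range(len(string) - 1):
--         if ord(string[i]) < 65 or ord(string[i]) > 90:
--             continue
--         elif ord(string[i + 1]) < 65 or ord(string[i + 1]) > 90:
--             continue
--         lists.append(string[i:i+2])
--     return lists
-- ===== SOURCE B (Python) =====
-- def multiple_sets(string):
--     # Two-phase: find maximal runs of ASCII uppercase letters, then expand
--     # each run into its adjacent 2-char slices.
--     res = []
--     n = len(string)
--     i = 0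
--     while i < n:
--         if 65 <= ord(string[i]) <= 90:
--             j = i + 1
--             while j < n and 65 <= ord(string[j]) <= 90:
--                 j += 1
--             for k in range(i, j - 1):
--                 res.append(string[k:k+2])
--             i = j
--         else:
--             i += 1
--     return res
-- ===== Notes on version B (the rewrite author's own statement) =====
-- stated objective: alternative
-- what changed: Replaces the flat per-index filter (testing both chars at every position) with a two-phase scan that first finds maximal runs of ASCII uppercase letters and then emits each run's adjacent pairs.
import Mathlib
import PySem

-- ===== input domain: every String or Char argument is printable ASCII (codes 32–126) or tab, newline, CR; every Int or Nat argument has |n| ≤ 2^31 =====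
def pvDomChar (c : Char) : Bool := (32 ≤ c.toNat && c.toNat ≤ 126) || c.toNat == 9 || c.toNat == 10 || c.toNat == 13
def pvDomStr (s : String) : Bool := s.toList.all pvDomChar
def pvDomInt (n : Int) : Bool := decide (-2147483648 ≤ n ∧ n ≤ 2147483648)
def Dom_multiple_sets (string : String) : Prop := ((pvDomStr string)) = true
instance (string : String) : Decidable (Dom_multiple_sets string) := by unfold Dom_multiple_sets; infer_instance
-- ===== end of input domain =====

-- B replaces A's flat per-index filter by a two-phase scan: find maximal runs of
-- ASCII uppercase letters, then emit each run's adjacent pairs (objective: alternative).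

-- ===== PORT A =====
-- Every index i drawn from range(len-1) makes string[i] and string[i+1] valid, and
-- string[i:i+2] = take 2 of drop i, so getElem!/drop/take are exact here.
def multiple_sets (string : String) : List String :=
  let cs := string.toList
  (List.range (cs.length - 1)).foldl
    (fun lists i =>
      if (cs[i]!).toNat < 65 ∨ 90 < (cs[i]!).toNat then lists
      else if (cs[i+1]!).toNat < 65 ∨ 90 < (cs[i+1]!).toNat then lists
      else lists ++ [String.ofList ((cs.drop i).take 2)]) []

-- ===== PORT B =====
def msUp (c : Char) : Bool := 65 ≤ c.toNat && c.toNat ≤ 90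

-- adjacent 2-char slices inside one run ('for k in range(i, j-1): res.append(string[k:k+2])')
def msPairs : List Char → List String
  | a :: b :: t => String.ofList [a, b] :: msPairs (b :: t)
  | _ => []

-- the outer while-loop of Source B: skip non-uppercase, else take the maximal uppercase run
def msRuns : List Char → List String
  | [] => []
  | c :: rest =>
    if msUp c then
      msPairs (c :: rest.takeWhile msUp) ++ msRuns (rest.dropWhile msUp)
    else msRuns rest
termination_by l => l.length
decreasing_by
  · exact Nat.lt_succ_of_le (List.length_dropWhile_le _ _)
  · exact Nat.lt_succ_self _

def multiple_sets_alt (string : String) : List String := msRuns string.toList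

-- ===== PRECONDITION & SPEC =====
def Spec_multiple_sets (string : String) (out : List String) : Prop := out = multiple_sets_alt string
instance (string : String) (out : List String) : Decidable (Spec_multiple_sets string out) := by unfold Spec_multiple_sets; infer_instance

-- ===== CLAIM (what is proved, stated in full; the proofs are below) =====
def Claim_equal_multiple_sets : Prop := ∀ (string : String), Dom_multiple_sets string → Spec_multiple_sets string (multiple_sets string)

-- ===== LEMMAS AND PROOFS =====

-- common reference form: the adjacent-uppercase pairs of a character list
def msSpec : List Char → List String
  | a :: b :: t => (if msUp a && msUp b then [String.ofList [a, b]] else []) ++ msSpec (b :: t)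
  | _ => []

-- A's per-index predicate
def msP (cs : List Char) (i : Nat) : Bool :=
  !((cs[i]!).toNat < 65 ∨ 90 < (cs[i]!).toNat : Bool) &&
  !((cs[i+1]!).toNat < 65 ∨ 90 < (cs[i+1]!).toNat : Bool)

lemma not_or_decide (p q : Prop) [Decidable p] [Decidable q] :
    (!decide (p ∨ q)) = (decide ¬p && decide ¬q) := by
  by_cases hp : p <;> by_cases hq : q <;> simp [hp, hq]

lemma not_lt65 (x : Nat) : (decide (¬(x < 65))) = (decide (65 ≤ x)) :=
  decide_eq_decide.mpr Nat.not_lt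

lemma not_gt90 (x : Nat) : (decide (¬(90 < x))) = (decide (x ≤ 90)) :=
  decide_eq_decide.mpr Nat.not_lt

lemma msP_eq (cs : List Char) (i : Nat) :
    msP cs i = (msUp cs[i]! && msUp cs[(i+1)]!) := by
  simp only [msP, msUp, not_or_decide, not_lt65, not_gt90]

lemma A_filter_map (cs : List Char) :
    ((List.range (cs.length - 1)).filter (msP cs)).map
      (fun i => String.ofList ((cs.drop i).take 2)) = msSpec cs := by
  induction cs with
  | nil => simp [msSpec]
  | cons a rest ih =>
    cases rest with
    | nil => simp [msSpec]
    | cons b t =>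
      have hshift : ∀ i, msP (a :: b :: t) (i + 1) = msP (b :: t) i := by
        intro i
        simp only [msP_eq, List.getElem!_cons_succ]
      have htail :
          ((List.filter (msP (a :: b :: t)) ((List.range t.length).map (· + 1))).map
            (fun i => String.ofList (((a :: b :: t).drop i).take 2))) = msSpec (b :: t) := by
        rw [List.filter_map, List.map_map]
        have hp : (List.range t.length).filter (msP (a :: b :: t) ∘ (· + 1)) =
            (List.range t.length).filter (msP (b :: t)) :=
          List.filter_congr (fun i _ => hshift i)
        rw [hp]
        have hf : ((fun i => String.ofList (((a :: b :: t).drop i).take 2)) ∘ (· + 1)) =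
            (fun i => String.ofList (((b :: t).drop i).take 2)) := by
          funext i; rfl
        rw [hf]
        exact ih
      have h0 : msP (a :: b :: t) 0 = (msUp a && msUp b) := by
        simp only [msP_eq, List.getElem!_cons_zero, List.getElem!_cons_succ]
      have hlen : (a :: b :: t).length - 1 = t.length + 1 := rfl
      rw [hlen, List.range_succ_eq_map, List.filter_cons, h0, msSpec]
      by_cases hab : (msUp a && msUp b) = true
      · rw [if_pos hab, if_pos hab, List.map_cons, htail]
        rfl
      · rw [if_neg hab, if_neg hab, htail, List.nil_append]

lemma A_eq_msSpec (cs : List Char) :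
    (List.range (cs.length - 1)).foldl
      (fun lists i =>
        if (cs[i]!).toNat < 65 ∨ 90 < (cs[i]!).toNat then lists
        else if (cs[i+1]!).toNat < 65 ∨ 90 < (cs[i+1]!).toNat then lists
        else lists ++ [String.ofList ((cs.drop i).take 2)]) [] = msSpec cs := by
  have hcongr := PySem.List.foldl_congr_mem'
    (l := List.range (cs.length - 1)) (init := ([] : List String))
    (f := fun lists i =>
        if (cs[i]!).toNat < 65 ∨ 90 < (cs[i]!).toNat then lists
        else if (cs[i+1]!).toNat < 65 ∨ 90 < (cs[i+1]!).toNat then lists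
        else lists ++ [String.ofList ((cs.drop i).take 2)])
    (g := fun lists i =>
        if msP cs i then lists ++ [String.ofList ((cs.drop i).take 2)] else lists)
    (by
      intro i _ lists
      dsimp only
      by_cases h1 : ((cs[i]!).toNat < 65 ∨ 90 < (cs[i]!).toNat)
      · have hm : msP cs i = false := by
          simp only [msP]; rw [decide_eq_true h1]; simp
        rw [if_pos h1, hm]
        exact (if_neg Bool.false_ne_true).symm
      · by_cases h2 : ((cs[i+1]!).toNat < 65 ∨ 90 < (cs[i+1]!).toNat)
        · have hm : msP cs i = false := by
            simp only [msP]; rw [decide_eq_true h2]; simp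
          rw [if_neg h1, if_pos h2, hm]
          exact (if_neg Bool.false_ne_true).symm
        · have hm : msP cs i = true := by
            simp only [msP]; rw [decide_eq_false h1, decide_eq_false h2]; rfl
          rw [if_neg h1, if_neg h2, hm]
          exact (if_pos rfl).symm)
  rw [hcongr, PySem.List.foldl_append_if, List.nil_append, A_filter_map]

lemma msPairs_run (t : List Char) :
    (∀ l : List Char, l.length ≤ t.length → msRuns l = msSpec l) →
    ∀ c, msUp c = true →
    msPairs (c :: t.takeWhile msUp) ++ msRuns (t.dropWhile msUp) = msSpec (c :: t) := by
  induction t with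
  | nil => intro _ c hc; simp [msPairs, msRuns, msSpec]
  | cons b t ih =>
    intro H c hc
    have e2 : msSpec (c :: b :: t) =
        (if msUp c && msUp b then [String.ofList [c, b]] else []) ++ msSpec (b :: t) := rfl
    by_cases hb : msUp b = true
    · have e1 : msPairs (c :: b :: List.takeWhile msUp t) =
          String.ofList [c, b] :: msPairs (b :: List.takeWhile msUp t) := rfl
      rw [List.takeWhile_cons_of_pos hb, List.dropWhile_cons_of_pos hb, e1, e2, hc, hb]
      simp only [Bool.and_self, if_true, List.cons_append]
      exact congrArg₂ _ rfl (ih (fun l hl => H l (le_trans hl (Nat.le_succ _))) b hb)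
    · have hb' : msUp b = false := by simpa using hb
      rw [List.takeWhile_cons_of_neg (by simp [hb']),
          List.dropWhile_cons_of_neg (by simp [hb']), e2, hb', Bool.and_false,
          if_neg Bool.false_ne_true, List.nil_append]
      have hpc : msPairs [c] = [] := rfl
      rw [hpc, List.nil_append]
      exact H (b :: t) (le_refl _)

lemma msRuns_eq_msSpec : ∀ l : List Char, msRuns l = msSpec l := by
  have key : ∀ n, ∀ l : List Char, l.length ≤ n → msRuns l = msSpec l := by
    intro n
    induction n with
    | zero =>
      intro l hl
      have : l = [] := List.eq_nil_of_length_eq_zero (Nat.le_zero.mp hl)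
      subst this; simp [msRuns, msSpec]
    | succ n ih =>
      intro l hl
      cases l with
      | nil => simp [msRuns, msSpec]
      | cons c rest =>
        by_cases hc : msUp c = true
        · rw [msRuns, if_pos hc]
          exact msPairs_run rest
            (fun l' hl' => ih l' (le_trans hl' (Nat.le_of_succ_le_succ hl))) c hc
        · rw [msRuns, if_neg hc]
          cases rest with
          | nil =>
            have hc' : msUp c = false := by simpa using hc
            simp [msRuns, msSpec]
          | cons b t =>
            have hc' : msUp c = false := by simpa using hc
            have e2 : msSpec (c :: b :: t) =
                (if msUp c && msUp b then [String.ofList [c, b]] else []) ++ msSpec (b :: t) := rfl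
            rw [ih (b :: t) (Nat.le_of_succ_le_succ hl), e2, hc', Bool.false_and,
                if_neg Bool.false_ne_true, List.nil_append]
  exact fun l => key l.length l (le_refl _)

-- ===== VERDICT (by name: the statement is the Claim_ definition above) =====
theorem multiple_sets_spec : Claim_equal_multiple_sets := by
  intro s _
  unfold Spec_multiple_sets multiple_sets multiple_sets_alt
  rw [msRuns_eq_msSpec]
  exact A_eq_msSpec s.toList
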